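-- pv_equiv track=rewrite | github.com/elokwentnie/usefulday | src/file_management/split_pdf.py | get_splitting_parts
-- ===== SOURCE A (Python) =====
-- from typing import List, Optional
--
-- def get_splitting_parts(pdf_length: int, num_parts: int) -> List[List[int]]:
--     """Calculate page ranges for splitting the PDF."""
--     pages_per_part = pdf_length // num_parts
--     remainder = pdf_length % num_parts
--
--     parts = []
--     start = 0
--     for i in range(num_parts):
--         end = start + pages_per_part + (1 if i < remainder else 0)
--         parts.append(list(range(start, end)))
--         start = end
--     return parts
-- ===== SOURCE B (Python) =====
-- def get_splitting_parts(pdf_length, num_parts):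
--     """Calculate page ranges for splitting the PDF."""
--     q, r = divmod(pdf_length, num_parts)
--     def start(i):
--         return i * q + min(i, r)
--     return [list(range(start(i), start(i + 1))) for i in range(num_parts)]
-- ===== Notes on version B (the rewrite author's own statement) =====
-- stated objective: alternative
-- what changed: Replaces A's running start/end accumulator loop with a closed-form per-part start index start(i)=i*q+min(i,r) and builds the result as a map over range(num_parts).
import Mathlib
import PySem

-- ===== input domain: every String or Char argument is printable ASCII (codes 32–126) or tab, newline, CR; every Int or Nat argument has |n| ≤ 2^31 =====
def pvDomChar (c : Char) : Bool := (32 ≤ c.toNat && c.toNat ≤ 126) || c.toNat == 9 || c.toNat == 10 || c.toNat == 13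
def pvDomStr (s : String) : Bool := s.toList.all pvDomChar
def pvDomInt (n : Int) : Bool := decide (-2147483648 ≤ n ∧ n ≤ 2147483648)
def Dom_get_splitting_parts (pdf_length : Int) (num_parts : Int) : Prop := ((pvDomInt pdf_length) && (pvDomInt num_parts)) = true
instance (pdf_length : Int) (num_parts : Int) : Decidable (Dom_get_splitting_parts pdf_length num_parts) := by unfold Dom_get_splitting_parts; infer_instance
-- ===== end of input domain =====

-- B replaces A's running start/end accumulator with the closed-form start(i) = i*q + min(i,r); same cost, different decomposition.


-- ===== PORT A =====
-- for i in range(num_parts): end = start + pages_per_part + (1 if i < remainder else 0); parts.append(list(range(start,end))); start = end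
def get_splitting_parts (pdf_length : Int) (num_parts : Int) : List (List Int) :=
  let pages_per_part := PySem.Int.floordiv pdf_length num_parts
  let remainder := PySem.Int.mod pdf_length num_parts
  ((PySem.List.pyRange 0 num_parts 1).foldl
    (fun (s : List (List Int) × Int) i =>
      let e := s.2 + pages_per_part + (if i < remainder then 1 else 0)
      (s.1 ++ [PySem.List.pyRange s.2 e 1], e))
    ([], 0)).1

-- ===== PORT B =====
-- def start(i): return i*q + min(i, r)
def gspStart (q r i : Int) : Int := i * q + min i r

def get_splitting_parts_alt (pdf_length : Int) (num_parts : Int) : List (List Int) :=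
  let q := PySem.Int.floordiv pdf_length num_parts
  let r := PySem.Int.mod pdf_length num_parts
  (PySem.List.pyRange 0 num_parts 1).map
    (fun i => PySem.List.pyRange (gspStart q r i) (gspStart q r (i + 1)) 1)

-- ===== PRECONDITION & SPEC =====
-- Python raises ZeroDivisionError (in both A and B) exactly when num_parts == 0.
def Pre_get_splitting_parts (pdf_length : Int) (num_parts : Int) : Prop := num_parts ≠ 0
instance (pdf_length : Int) (num_parts : Int) : Decidable (Pre_get_splitting_parts pdf_length num_parts) := by unfold Pre_get_splitting_parts; infer_instance
def pvWitness_get_splitting_parts : Int × Int := (10, 3)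

def Spec_get_splitting_parts (pdf_length : Int) (num_parts : Int) (out : List (List Int)) : Prop := out = get_splitting_parts_alt pdf_length num_parts
instance (pdf_length : Int) (num_parts : Int) (out : List (List Int)) : Decidable (Spec_get_splitting_parts pdf_length num_parts out) := by unfold Spec_get_splitting_parts; infer_instance

-- ===== CLAIM (what is proved, stated in full; the proofs are below) =====
def Claim_equal_get_splitting_parts : Prop := ∀ (pdf_length : Int) (num_parts : Int), Dom_get_splitting_parts pdf_length num_parts → Pre_get_splitting_parts pdf_length num_parts → Spec_get_splitting_parts pdf_length num_parts (get_splitting_parts pdf_length num_parts)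

-- ===== LEMMAS AND PROOFS =====

-- one loop step advances the closed-form start by exactly q + (1 if i<r else 0)
lemma gspStart_step (q r i : Int) (hi : 0 ≤ i) :
    gspStart q r i + q + (if i < r then 1 else 0) = gspStart q r (i + 1) := by
  simp only [gspStart, add_one_mul]
  split_ifs <;> omega

-- loop invariant: starting A's fold at index a with running start = gspStart q r a
-- appends exactly B's pieces for indices a..b-1
lemma gsp_loop (q r : Int) (hr : 0 ≤ r) :
    ∀ (n : Nat) (a b : Int), 0 ≤ a → b - a = (n : Int) →
    ∀ (acc : List (List Int)),
    ((PySem.List.pyRange a b 1).foldl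
      (fun (s : List (List Int) × Int) i =>
        let e := s.2 + q + (if i < r then 1 else 0)
        (s.1 ++ [PySem.List.pyRange s.2 e 1], e))
      (acc, gspStart q r a)).1
    = acc ++ (PySem.List.pyRange a b 1).map
        (fun i => PySem.List.pyRange (gspStart q r i) (gspStart q r (i + 1)) 1) := by
  intro n
  induction n with
  | zero =>
    intro a b ha hab acc
    rw [PySem.List.pyRange_one_eq_nil (by omega)]
    simp
  | succ m ih =>
    intro a b ha hab acc
    rw [PySem.List.pyRange_one_cons (by omega)]
    simp only [List.foldl_cons, List.map_cons]
    rw [gspStart_step q r a ha]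
    rw [ih (a + 1) b (by omega) (by omega)]
    simp

theorem get_splitting_parts_spec : Claim_equal_get_splitting_parts := by
  intro pdf_length num_parts _ hpre
  unfold Spec_get_splitting_parts get_splitting_parts get_splitting_parts_alt
  by_cases hn : num_parts ≤ 0
  · rw [PySem.List.pyRange_one_eq_nil hn]
    simp
  · rw [not_le] at hn
    have hr : 0 ≤ PySem.Int.mod pdf_length num_parts := PySem.Int.mod_nonneg pdf_length hn
    have h0 : gspStart (PySem.Int.floordiv pdf_length num_parts) (PySem.Int.mod pdf_length num_parts) 0 = 0 := by
      simp [gspStart]; omega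
    have := gsp_loop (PySem.Int.floordiv pdf_length num_parts) (PySem.Int.mod pdf_length num_parts)
      hr num_parts.toNat 0 num_parts (le_refl 0) (by omega) []
    rw [h0] at this
    simpa using this
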